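-- pv_equiv track=rewrite | github.com/santha22/PythonPrograms | GFG/Binary Search/singleElementSortedArray.py | findOnce
-- ===== SOURCE A (Python) =====
-- def findOnce(arr : list, n : int):
--     # Complete this function
--     l,h = 0, len(arr) - 1
--     if len(arr) == 1:
--         return arr[0]
--
--     m = (l + h) // 2
--     while l <= m:
--         if arr[l] != arr[l + 1] and l + 1 < len(arr):
--             return arr[l]
--
--         l += 2
--
--     m = m + 1
--     while m <= h:
--         if arr[h] != arr[h - 1] and h - 1 >= 0:
--             return arr[h]
--
--         h -= 2
-- ===== SOURCE B (Python) =====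
-- def findOnce(arr: list, n: int):
--     # Data-first decomposition: collect all adjacent-mismatch positions once,
--     # then pick the answer by index arithmetic instead of two early-return scans.
--     L = len(arr)
--     if L == 1:
--         return arr[0]
--     m = (L - 1) // 2
--     diffs = [i for i in range(L - 1) if arr[i] != arr[i + 1]]
--     front = [i for i in diffs if i % 2 == 0 and i <= m]
--     if front:
--         return arr[front[0]]
--     back = [i + 1 for i in diffs if i + 1 > m and (L - 1 - (i + 1)) % 2 == 0]
--     if back:
--         return arr[back[-1]]
--     return None
-- ===== Notes on version B (the rewrite author's own statement) =====
-- stated objective: alternative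
-- what changed: A's two stateful early-return scans (front half upward by 2, back half downward by 2) are replaced by one pass that collects every adjacent-mismatch position into a list and then selects the answer purely by index arithmetic (first even front index, else last parity-aligned back index).
import Mathlib
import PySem

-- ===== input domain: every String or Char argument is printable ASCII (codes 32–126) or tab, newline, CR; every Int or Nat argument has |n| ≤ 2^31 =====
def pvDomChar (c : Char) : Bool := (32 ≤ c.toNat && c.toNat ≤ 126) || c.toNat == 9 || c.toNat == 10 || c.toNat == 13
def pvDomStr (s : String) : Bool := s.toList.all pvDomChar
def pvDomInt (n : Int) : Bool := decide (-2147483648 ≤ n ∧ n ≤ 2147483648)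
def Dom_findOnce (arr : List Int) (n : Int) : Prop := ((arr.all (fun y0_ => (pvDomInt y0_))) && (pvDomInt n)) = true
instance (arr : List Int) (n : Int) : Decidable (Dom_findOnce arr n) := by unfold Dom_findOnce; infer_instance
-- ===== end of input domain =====

-- B replaces A's two early-return directional scans by one pass that collects all adjacent-mismatch positions and then selects the answer by index arithmetic (alternative decomposition, same complexity).


-- ===== PORT A =====
-- second while loop of A ('while m <= h: …; h -= 2'); fuel only makes the recursion total
def loopA2 (arr : List Int) (fuel : Nat) (m h : Int) : Option Int :=
  match fuel with
  | 0 => none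
  | fuel + 1 =>
    if m ≤ h then
      if PySem.List.pyGet? arr h ≠ PySem.List.pyGet? arr (h - 1) ∧ h - 1 ≥ 0 then
        PySem.List.pyGet? arr h
      else loopA2 arr fuel m (h - 2)
    else none

-- first while loop of A ('while l <= m: …; l += 2'); on fall-through it runs A's second loop
def loopA1 (arr : List Int) (fuel : Nat) (l m h : Int) : Option Int :=
  match fuel with
  | 0 => none
  | fuel + 1 =>
    if l ≤ m then
      if PySem.List.pyGet? arr l ≠ PySem.List.pyGet? arr (l + 1) ∧ l + 1 < (arr.length : Int) then
        PySem.List.pyGet? arr l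
      else loopA1 arr fuel (l + 2) m h
    else loopA2 arr (arr.length + 1) (m + 1) h

def findOnce (arr : List Int) (n : Int) : Option Int :=
  let l : Int := 0
  let h : Int := (arr.length : Int) - 1
  if (arr.length : Int) = 1 then PySem.List.pyGet? arr 0
  else
    let m := PySem.Int.floordiv (l + h) 2
    loopA1 arr (arr.length + 1) l m h

-- ===== PORT B =====
-- list indexing inside the comprehensions is always in range (0 ≤ i < len-1), so arr.getD is exact there
def findOnce_alt (arr : List Int) (n : Int) : Option Int :=
  if arr.length = 1 then PySem.List.pyGet? arr 0
  else
    let m : Int := PySem.Int.floordiv ((arr.length : Int) - 1) 2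
    let diffs := (List.range (arr.length - 1)).filter
      (fun i => !(arr.getD i 0 == arr.getD (i + 1) 0))
    let front := diffs.filter (fun (i : Nat) => i % 2 == 0 && decide ((i : Int) ≤ m))
    match front.head? with
    | some i => PySem.List.pyGet? arr (i : Int)
    | none =>
      let back := (diffs.filter
          (fun (i : Nat) => decide (((i : Int) + 1) > m) && ((arr.length - 1 - (i + 1)) % 2 == 0))).map
        (fun (i : Nat) => i + 1)
      match back.getLast? with
      | some h => PySem.List.pyGet? arr (h : Int)
      | none => none

-- ===== PRECONDITION & SPEC =====
def Spec_findOnce (arr : List Int) (n : Int) (out : Option Int) : Prop := out = findOnce_alt arr n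
instance (arr : List Int) (n : Int) (out : Option Int) : Decidable (Spec_findOnce arr n out) := by unfold Spec_findOnce; infer_instance

-- ===== CLAIM (what is proved, stated in full; the proofs are below) =====
def Claim_equal_findOnce : Prop := ∀ (arr : List Int) (n : Int), Dom_findOnce arr n → Spec_findOnce arr n (findOnce arr n)

-- ===== LEMMAS AND PROOFS =====

-- 'adjacent mismatch at i' (B's diffs predicate)
def pmis (arr : List Int) (i : Nat) : Bool := !(arr.getD i 0 == arr.getD (i + 1) 0)

-- the midpoint m both programs compute
def mI (arr : List Int) : Int := PySem.Int.floordiv ((arr.length : Int) - 1) 2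

-- B's front/back filters after List.filter_filter fuses the two comprehensions
def pfr (arr : List Int) (i : Nat) : Bool :=
  (i % 2 == 0 && decide ((i : Int) ≤ mI arr)) && pmis arr i
def pbk (arr : List Int) (i : Nat) : Bool :=
  (decide (((i : Int) + 1) > mI arr) && ((arr.length - 1 - (i + 1)) % 2 == 0)) && pmis arr i

def backAns (arr : List Int) : Option Int :=
  ((List.range (arr.length - 1)).filter (pbk arr)).getLast?.map (fun j => arr.getD (j + 1) 0)

lemma pyGet_eq (arr : List Int) (i : Nat) (h : i < arr.length) :
    PySem.List.pyGet? arr (i : Int) = some (arr.getD i 0) := by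
  rw [PySem.List.pyGet?_natCast]
  simp [List.getElem?_eq_getElem h, List.getD_eq_getElem?_getD]

lemma hmI (arr : List Int) (h1 : 1 ≤ arr.length) :
    mI arr = (((arr.length - 1) / 2 : Nat) : Int) := by
  unfold mI
  have h : ((arr.length : Int) - 1) = ((arr.length - 1 : Nat) : Int) := by omega
  rw [h]
  exact_mod_cast PySem.Int.floordiv_natCast (arr.length - 1) 2

lemma filter_range_head (q : Nat → Bool) :
    ∀ (n l : Nat), l < n → q l = true → (∀ i, i < l → q i = false) →
      ((List.range n).filter q).head? = some l := by
  intro n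
  induction n with
  | zero => intro l h; omega
  | succ n ih =>
    intro l hl hq hmin
    rw [List.range_succ, List.filter_append]
    by_cases hln : l < n
    · rw [List.head?_append, ih l hln hq hmin]
      rfl
    · have hln2 : l = n := by omega
      have hnil : (List.range n).filter q = [] := by
        rw [List.filter_eq_nil_iff]
        intro i hi
        have : i < l := by have := List.mem_range.mp hi; omega
        simp [hmin i this]
      rw [hnil, List.nil_append]
      subst hln2
      simp [hq]

lemma filter_range_getLast (q : Nat → Bool) :
    ∀ (n l : Nat), l < n → q l = true → (∀ i, l < i → i < n → q i = false) →
      ((List.range n).filter q).getLast? = some l := by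
  intro n
  induction n with
  | zero => intro l h; omega
  | succ n ih =>
    intro l hl hq hmax
    rw [List.range_succ, List.filter_append]
    by_cases hln : l < n
    · have hqn : q n = false := hmax n hln (by omega)
      simp only [List.filter_singleton, hqn, cond_false, List.append_nil]
      exact ih l hln hq (fun i h1 h2 => hmax i h1 (by omega))
    · have hln2 : l = n := by omega
      subst hln2
      simp only [List.filter_singleton, hq, cond_true]
      exact List.getLast?_concat

lemma pfr_iff (arr : List Int) (h1 : 1 ≤ arr.length) (i : Nat) :
    pfr arr i = true ↔
      (i % 2 = 0 ∧ i ≤ (arr.length - 1) / 2 ∧ ¬ arr.getD i 0 = arr.getD (i + 1) 0) := by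
  unfold pfr pmis
  rw [hmI arr h1]
  simp only [Bool.and_eq_true, beq_iff_eq, decide_eq_true_eq, Bool.not_eq_eq_eq_not,
    Bool.not_true, beq_eq_false_iff_ne, ne_eq]
  constructor
  · rintro ⟨⟨ha, hb⟩, hc⟩; exact ⟨ha, by omega, hc⟩
  · rintro ⟨ha, hb, hc⟩; exact ⟨⟨ha, by omega⟩, hc⟩

lemma pbk_iff (arr : List Int) (h1 : 1 ≤ arr.length) (i : Nat) :
    pbk arr i = true ↔
      ((arr.length - 1) / 2 < i + 1 ∧ (arr.length - 1 - (i + 1)) % 2 = 0 ∧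
        ¬ arr.getD i 0 = arr.getD (i + 1) 0) := by
  unfold pbk pmis
  rw [hmI arr h1]
  simp only [Bool.and_eq_true, beq_iff_eq, decide_eq_true_eq, Bool.not_eq_eq_eq_not,
    Bool.not_true, beq_eq_false_iff_ne, ne_eq]
  constructor
  · rintro ⟨⟨ha, hb⟩, hc⟩; exact ⟨by omega, hb, hc⟩
  · rintro ⟨ha, hb, hc⟩; exact ⟨⟨by omega, hb⟩, hc⟩

lemma alt_char (arr : List Int) (n : Int) (hL : arr.length ≠ 1) :
    findOnce_alt arr n =
      match ((List.range (arr.length - 1)).filter (pfr arr)).head? with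
      | some i => some (arr.getD i 0)
      | none => backAns arr := by
  unfold findOnce_alt
  rw [if_neg hL]
  simp only [List.filter_filter]
  show (match ((List.range (arr.length - 1)).filter (pfr arr)).head? with
      | some i => PySem.List.pyGet? arr ((i : Nat) : Int)
      | none =>
        match (((List.range (arr.length - 1)).filter (pbk arr)).map
            (fun (i : Nat) => i + 1)).getLast? with
        | some h => PySem.List.pyGet? arr ((h : Nat) : Int)
        | none => none) = _
  cases hh : ((List.range (arr.length - 1)).filter (pfr arr)).head? with
  | some i =>
    have hi : i < arr.length := by
      have hm := List.mem_filter.mp (List.mem_of_mem_head? hh)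
      have := List.mem_range.mp hm.1
      omega
    simp [pyGet_eq arr i hi]
  | none =>
    rw [List.getLast?_map]
    unfold backAns
    cases hb : ((List.range (arr.length - 1)).filter (pbk arr)).getLast? with
    | none => rfl
    | some j =>
      have hj : j + 1 < arr.length := by
        have hm := List.mem_filter.mp (List.mem_of_getLast? hb)
        have := List.mem_range.mp hm.1
        omega
      simp only [Option.map_some]
      exact pyGet_eq arr (j + 1) hj

lemma loopA2_char (arr : List Int) (hL : 2 ≤ arr.length) :
    ∀ (fuel h : Nat), h ≤ arr.length - 1 → (arr.length - 1 - h) % 2 = 0 → h + 1 ≤ fuel →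
      loopA2 arr fuel (mI arr + 1) (h : Int) =
        ((List.range (arr.length - 1)).filter (fun i => pbk arr i && decide (i + 1 ≤ h))).getLast?.map
          (fun j => arr.getD (j + 1) 0) := by
  intro fuel
  induction fuel with
  | zero => intro h _ _ hf; omega
  | succ fuel ih =>
    intro h hh hpar hf
    have hmi : mI arr = (((arr.length - 1) / 2 : Nat) : Int) := hmI arr (by omega)
    by_cases hcond : mI arr + 1 ≤ (h : Int)
    · have hcn : (arr.length - 1) / 2 + 1 ≤ h := by omega
      have hh1 : 1 ≤ h := by omega
      have hhL : h < arr.length := by omega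
      have hg1 : (h : Int) - 1 = ((h - 1 : Nat) : Int) := by omega
      have he : h - 1 + 1 = h := by omega
      simp only [loopA2, if_pos hcond, hg1, pyGet_eq arr h hhL, pyGet_eq arr (h - 1) (by omega)]
      by_cases hm : arr.getD (h - 1) 0 = arr.getD h 0
      · -- no mismatch at (h-1, h): the loop steps down
        rw [if_neg (fun hc => hc.1 (congrArg some hm.symm))]
        by_cases hone : h = 1
        · -- next index is -1: the loop exits; the filtered list is empty too
          subst hone
          rw [show (((1 : Nat) : Int) - 2) = (-1 : Int) from by norm_num]
          have hnone : loopA2 arr fuel (mI arr + 1) (-1) = none := by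
            cases fuel with
            | zero => rfl
            | succ f => simp only [loopA2, if_neg (by omega : ¬ (mI arr + 1 ≤ (-1 : Int)))]
          rw [hnone]
          have hemp : (List.range (arr.length - 1)).filter
              (fun i => pbk arr i && decide (i + 1 ≤ 1)) = [] := by
            rw [List.filter_eq_nil_iff]
            intro i hi
            simp only [Bool.and_eq_true, decide_eq_true_eq, not_and]
            intro hp hle
            have := (pbk_iff arr (by omega) i).mp hp
            have hi0 : i = 0 := by omega
            rw [hi0] at this
            exact this.2.2 (by simpa using hm)
          rw [hemp]
          rfl
        · have h2 : 2 ≤ h := by omega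
          have hg2 : (h : Int) - 2 = ((h - 2 : Nat) : Int) := by omega
          have hcongr : (List.range (arr.length - 1)).filter
                (fun i => pbk arr i && decide (i + 1 ≤ h))
              = (List.range (arr.length - 1)).filter
                (fun i => pbk arr i && decide (i + 1 ≤ h - 2)) := by
            apply List.filter_congr
            intro i hi
            have hiL : i < arr.length - 1 := List.mem_range.mp hi
            by_cases hp : pbk arr i = true
            · have hfacts := (pbk_iff arr (by omega) i).mp hp
              have hne1 : i ≠ h - 1 := by
                intro hc
                apply hfacts.2.2
                rw [hc, he]
                exact hm
              have hne2 : i ≠ h - 2 := by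
                intro hc
                have := hfacts.2.1
                rw [hc] at this
                omega
              have : decide (i + 1 ≤ h) = decide (i + 1 ≤ h - 2) :=
                decide_eq_decide.mpr (by constructor <;> intro <;> omega)
              rw [hp, this]
            · have hp' : pbk arr i = false := by
                cases hq : pbk arr i
                · rfl
                · exact absurd hq hp
              rw [hp']
              simp
          rw [hcongr, hg2]
          exact ih (h - 2) (by omega) (by omega) (by omega)
      · -- mismatch at (h-1, h): A returns arr[h]; (h-1) is the last qualifying index
        rw [if_pos ⟨fun hc => hm (Option.some.inj hc).symm, by positivity⟩]
        have hlast := filter_range_getLast (fun i => pbk arr i && decide (i + 1 ≤ h))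
          (arr.length - 1) (h - 1) (by omega)
          (by
            simp only [Bool.and_eq_true, decide_eq_true_eq]
            refine ⟨(pbk_iff arr (by omega) (h - 1)).mpr ⟨by omega, by rw [he]; omega, ?_⟩, by omega⟩
            rw [he]
            exact hm)
          (by
            intro i h1i h2i
            have : ¬ (i + 1 ≤ h) := by omega
            simp [this])
        rw [hlast]
        simp only [Option.map_some, he]
  -- loop exit: h already below m+1; nothing qualifies
    · simp only [loopA2, if_neg hcond]
      have hemp : (List.range (arr.length - 1)).filter
          (fun i => pbk arr i && decide (i + 1 ≤ h)) = [] := by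
        rw [List.filter_eq_nil_iff]
        intro i hi
        simp only [Bool.and_eq_true, decide_eq_true_eq, not_and]
        intro hp hle
        have := (pbk_iff arr (by omega) i).mp hp
        omega
      rw [hemp]
      rfl

lemma loopA1_char (arr : List Int) (hL : 2 ≤ arr.length) :
    ∀ (fuel l : Nat), l % 2 = 0 → l ≤ arr.length → arr.length + 1 ≤ fuel + l →
      loopA1 arr fuel (l : Int) (mI arr) ((arr.length : Int) - 1) =
        match ((List.range (arr.length - 1)).filter (fun i => pfr arr i && decide (l ≤ i))).head? with
        | some i => some (arr.getD i 0)
        | none => backAns arr := by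
  intro fuel
  induction fuel with
  | zero => intro l _ hlL hf; omega
  | succ fuel ih =>
    intro l hle hlL hf
    have hmi : mI arr = (((arr.length - 1) / 2 : Nat) : Int) := hmI arr (by omega)
    by_cases hlm : (l : Int) ≤ mI arr
    · have hln : l ≤ (arr.length - 1) / 2 := by omega
      have hlL2 : l < arr.length - 1 := by omega
      have hl1 : (l : Int) + 1 = ((l + 1 : Nat) : Int) := by push_cast; ring
      simp only [loopA1, if_pos hlm, hl1, pyGet_eq arr l (by omega),
        pyGet_eq arr (l + 1) (by omega)]
      by_cases hm : arr.getD l 0 = arr.getD (l + 1) 0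
      · -- no mismatch at (l, l+1): the loop steps up
        rw [if_neg (fun hc => hc.1 (congrArg some hm))]
        have hcongr : (List.range (arr.length - 1)).filter
              (fun i => pfr arr i && decide (l ≤ i))
            = (List.range (arr.length - 1)).filter
              (fun i => pfr arr i && decide (l + 2 ≤ i)) := by
          apply List.filter_congr
          intro i hi
          by_cases hp : pfr arr i = true
          · have hfacts := (pfr_iff arr (by omega) i).mp hp
            have hne1 : i ≠ l := fun hc => hfacts.2.2 (hc ▸ hm)
            have hne2 : i ≠ l + 1 := by
              intro hc
              have := hfacts.1
              omega
            have : decide (l ≤ i) = decide (l + 2 ≤ i) :=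
              decide_eq_decide.mpr (by constructor <;> intro <;> omega)
            rw [hp, this]
          · have hp' : pfr arr i = false := by
              cases hq : pfr arr i
              · rfl
              · exact absurd hq hp
            rw [hp']
            simp
        have hl2 : (l : Int) + 2 = ((l + 2 : Nat) : Int) := by push_cast; ring
        rw [hcongr, hl2]
        exact ih (l + 2) (by omega) (by omega) (by omega)
      · -- first qualifying front index is l itself: A returns arr[l]
        rw [if_pos ⟨fun hc => hm (Option.some.inj hc),
          by exact_mod_cast (by omega : l + 1 < arr.length)⟩]
        rw [filter_range_head (fun i => pfr arr i && decide (l ≤ i)) (arr.length - 1) l hlL2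
          (by simp [(pfr_iff arr (by omega) l).mpr ⟨hle, hln, hm⟩])
          (by
            intro i hil
            have : ¬ (l ≤ i) := by omega
            simp [this])]
    · -- l has passed m: the front filter is empty, A runs its second loop
      simp only [loopA1, if_neg hlm]
      have hfr_none : (List.range (arr.length - 1)).filter
          (fun i => pfr arr i && decide (l ≤ i)) = [] := by
        rw [List.filter_eq_nil_iff]
        intro i hi
        simp only [Bool.and_eq_true, decide_eq_true_eq, not_and]
        intro hp hli
        have := (pfr_iff arr (by omega) i).mp hp
        omega
      simp only [hfr_none, List.head?_nil]
      have hgl : ((arr.length : Int) - 1) = ((arr.length - 1 : Nat) : Int) := by omega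
      rw [hgl, loopA2_char arr hL (arr.length + 1) (arr.length - 1) (le_refl _) (by omega)
        (by omega)]
      unfold backAns
      have : (List.range (arr.length - 1)).filter
            (fun i => pbk arr i && decide (i + 1 ≤ arr.length - 1))
          = (List.range (arr.length - 1)).filter (pbk arr) := by
        apply List.filter_congr
        intro i hi
        have := List.mem_range.mp hi
        have hd : decide (i + 1 ≤ arr.length - 1) = true := decide_eq_true (by omega)
        rw [hd, Bool.and_true]
      rw [this]

-- ===== VERDICT (by name: the statement is the Claim_ definition above) =====
theorem findOnce_spec : Claim_equal_findOnce := by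
  intro arr n _
  show findOnce arr n = findOnce_alt arr n
  by_cases h1 : arr.length = 1
  · unfold findOnce findOnce_alt
    rw [if_pos (by exact_mod_cast h1 : (arr.length : Int) = 1), if_pos h1]
  · by_cases h0 : arr.length = 0
    · have : arr = [] := List.length_eq_zero_iff.mp h0
      subst this
      rfl
    · have hL : 2 ≤ arr.length := by omega
      rw [alt_char arr n h1]
      unfold findOnce
      rw [if_neg (fun hc => h1 (by exact_mod_cast hc))]
      have hz : (0 : Int) + ((arr.length : Int) - 1) = (arr.length : Int) - 1 := by ring
      show loopA1 arr (arr.length + 1) 0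
        (PySem.Int.floordiv ((0 : Int) + ((arr.length : Int) - 1)) 2) ((arr.length : Int) - 1) = _
      rw [hz]
      have hchar := loopA1_char arr hL (arr.length + 1) 0 rfl (by omega) (by omega)
      simp only [Nat.cast_zero] at hchar
      rw [show PySem.Int.floordiv ((arr.length : Int) - 1) 2 = mI arr from rfl, hchar]
      have hfe : (List.range (arr.length - 1)).filter (fun i => pfr arr i && decide (0 ≤ i))
          = (List.range (arr.length - 1)).filter (pfr arr) := by
        apply List.filter_congr
        intro i _
        simp
      rw [hfe]
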